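-- pv_equiv track=rewrite | github.com/Jithincorleone/Python_Pet_Projects | calculator.py | check_operator_cnt
-- ===== SOURCE A (Python) =====
-- operatorList=['+','-','/','*']
--
-- def check_operator_cnt(userInput):
--   operatorCnt=0
--
--   for i in range(0,len(userInput)):
--     if operatorList.count(userInput[i]) >= 1:
--       operatorCnt=int(operatorCnt)+1
--
--   if operatorCnt > 1 :
--     return 1
--   else:
--     return 0
-- ===== SOURCE B (Python) =====
-- operatorList=['+','-','/','*']
--
-- def check_operator_cnt(userInput):
--   total = sum(userInput.count(op) for op in operatorList)
--   return 1 if total > 1 else 0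
-- ===== Notes on version B (the rewrite author's own statement) =====
-- stated objective: idiomatic
-- what changed: Replaces the index loop over characters with a membership test per character by a sum of four whole-string .count scans, one per operator, compared once against the threshold.
import Mathlib
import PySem

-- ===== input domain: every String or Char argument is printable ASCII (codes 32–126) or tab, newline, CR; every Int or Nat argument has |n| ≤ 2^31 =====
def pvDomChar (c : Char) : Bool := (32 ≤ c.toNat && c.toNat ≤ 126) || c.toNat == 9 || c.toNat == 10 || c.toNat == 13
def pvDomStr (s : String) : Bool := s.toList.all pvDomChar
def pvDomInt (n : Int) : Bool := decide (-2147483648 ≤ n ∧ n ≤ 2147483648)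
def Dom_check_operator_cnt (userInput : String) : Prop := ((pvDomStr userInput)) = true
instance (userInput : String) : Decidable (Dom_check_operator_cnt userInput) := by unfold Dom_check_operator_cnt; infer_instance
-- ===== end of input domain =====

-- B replaces the character scan with one whole-string count per operator, summed and compared once. (objective: idiomatic)
-- ===== PORT A =====
def operatorList : List Char := ['+', '-', '/', '*']

def check_operator_cnt (userInput : String) : Int :=
  let operatorCnt : Int :=
    userInput.toList.foldl
      (fun operatorCnt c => if PySem.List.count operatorList c ≥ 1 then operatorCnt + 1 else operatorCnt) 0
  if operatorCnt > 1 then 1 else 0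

-- ===== PORT B =====
def check_operator_cnt_alt (userInput : String) : Int :=
  let total : Nat := (["+", "-", "/", "*"].map (fun op => PySem.Str.count userInput op)).sum
  if total > 1 then 1 else 0

-- ===== PRECONDITION & SPEC =====
def Spec_check_operator_cnt (userInput : String) (out : Int) : Prop := out = check_operator_cnt_alt userInput
instance (userInput : String) (out : Int) : Decidable (Spec_check_operator_cnt userInput out) := by unfold Spec_check_operator_cnt; infer_instance

-- ===== CLAIM (what is proved, stated in full; the proofs are below) =====
def Claim_equal_check_operator_cnt : Prop := ∀ (userInput : String), Dom_check_operator_cnt userInput → Spec_check_operator_cnt userInput (check_operator_cnt userInput)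

-- ===== LEMMAS AND PROOFS =====

-- counting a single-character needle is counting that character
theorem chars_count_go_single (c : Char) : ∀ (fuel : Nat) (l : List Char) (acc : Nat),
    l.length ≤ fuel → PySem.Chars.count.go [c] fuel l acc = acc + l.count c := by
  intro fuel
  induction fuel with
  | zero => intro l acc h; cases l with
    | nil => simp [PySem.Chars.count.go]
    | cons x t => simp at h
  | succ n ih =>
    intro l acc h
    cases l with
    | nil => simp [PySem.Chars.count.go]
    | cons x t =>
      simp only [PySem.Chars.count.go, List.isPrefixOf, List.length_cons] at *
      by_cases hx : c = x
      · subst hx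
        simp only [BEq.rfl, Bool.true_and, if_pos]
        rw [show List.drop ([].length + 1) (c :: t) = t from rfl, ih t (acc + 1) (by omega)]
        simp
        omega
      · have hbe : (c == x) = false := by simp [hx]
        simp only [hbe, Bool.false_and, if_neg Bool.false_ne_true]
        rw [ih t acc (by omega)]
        simp [Ne.symm hx]

theorem chars_count_single (c : Char) (l : List Char) :
    PySem.Chars.count l [c] = l.count c := by
  have := chars_count_go_single c l.length l 0 (le_refl _)
  simpa [PySem.Chars.count] using this

theorem counts_eq (l : List Char) :
    (l.countP (fun c => decide (PySem.List.count operatorList c ≥ 1)) : Nat)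
      = l.count '+' + l.count '-' + l.count '/' + l.count '*' := by
  induction l with
  | nil => simp
  | cons x t ih =>
    simp only [List.countP_cons, List.count_cons, ih]
    by_cases h1 : x = '+'
    · subst h1; simp [PySem.List.count, operatorList]; omega
    by_cases h2 : x = '-'
    · subst h2; simp [PySem.List.count, operatorList]; omega
    by_cases h3 : x = '/'
    · subst h3; simp [PySem.List.count, operatorList]; omega
    by_cases h4 : x = '*'
    · subst h4; simp [PySem.List.count, operatorList]; omega
    · simp [PySem.List.count, operatorList, h1, h2, h3, h4,
        Ne.symm h1, Ne.symm h2, Ne.symm h3, Ne.symm h4]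

-- ===== VERDICT (by name: the statement is the Claim_ definition above) =====
theorem check_operator_cnt_spec : Claim_equal_check_operator_cnt := by
  intro s _
  unfold Spec_check_operator_cnt check_operator_cnt check_operator_cnt_alt
  simp only [PySem.List.foldl_ite_add_one, List.map, List.sum_cons, List.sum_nil,
    PySem.Str.count_eq,
    show ("+" : String).toList = ['+'] from rfl, show ("-" : String).toList = ['-'] from rfl,
    show ("/" : String).toList = ['/'] from rfl, show ("*" : String).toList = ['*'] from rfl,
    chars_count_single]
  have := counts_eq s.toList
  split_ifs with ha hb hb <;> first | rfl | (exfalso; omega)
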